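-- pv_equiv track=rewrite | github.com/mateosi98/Time | new_2.py | e1_to_e2
-- ===== SOURCE A (Python) =====
-- def e1_to_e2(braid):
--   new_braid = [ [0 for _ in range(len(braid[0]))] for _ in range(len(braid)+1)]
--   for i in range(len(braid)):
--       for j in range(len(braid[0])):
--           if braid[i][j] == 1:
--               new_braid[i][j] = 1
--               new_braid[i+1][j] = -1
--           if braid[i][j] == -1:
--               new_braid[i][j] = -1
--               new_braid[i+1][j] = 1
--   # now braid is the standard encoding e1, and new_braid is e2
--   return new_braid
-- ===== SOURCE B (Python) =====
-- def e1_to_e2(braid):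
--     n, m = len(braid), len(braid[0])
--     def cell(i, j):
--         if i < n and braid[i][j] in (1, -1):
--             return braid[i][j]
--         if i > 0 and braid[i - 1][j] in (1, -1):
--             return -braid[i - 1][j]
--         return 0
--     return [[cell(i, j) for j in range(m)] for i in range(n + 1)]
-- ===== Notes on version B (the rewrite author's own statement) =====
-- stated objective: alternative
-- what changed: output-driven gather: each result cell (i,j) is computed directly from braid[i][j] and braid[i-1][j], instead of A's input-driven scatter that pre-allocates a zero matrix and writes every +-1 input cell into two output rows
import Mathlib
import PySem

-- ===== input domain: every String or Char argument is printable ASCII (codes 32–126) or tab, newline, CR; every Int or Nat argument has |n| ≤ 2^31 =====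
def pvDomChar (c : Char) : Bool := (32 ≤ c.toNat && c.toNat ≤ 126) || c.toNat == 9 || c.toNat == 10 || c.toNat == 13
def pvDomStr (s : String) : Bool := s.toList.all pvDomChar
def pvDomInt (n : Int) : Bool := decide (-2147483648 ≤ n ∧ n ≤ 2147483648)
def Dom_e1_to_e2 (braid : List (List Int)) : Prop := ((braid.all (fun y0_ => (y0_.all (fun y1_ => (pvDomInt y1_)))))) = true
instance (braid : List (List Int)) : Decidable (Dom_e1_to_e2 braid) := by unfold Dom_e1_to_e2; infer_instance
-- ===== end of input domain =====

-- B is an output-driven gather (each result cell computed from braid[i][j] and braid[i-1][j])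
-- instead of A's input-driven scatter into a pre-allocated zero matrix; same asymptotic cost.

-- ===== PORT A =====
-- braid[i][j] (always in range on Pre_)
def bg (braid : List (List Int)) (i j : Nat) : Int := (braid.getD i []).getD j 0

-- new_braid[i][j] = v  (Python list assignment, index in range)
def setCell (mat : List (List Int)) (i j : Nat) (v : Int) : List (List Int) :=
  mat.set i ((mat.getD i []).set j v)

-- body of A's inner loop over j
def stepA (braid : List (List Int)) (i : Nat) (nb : List (List Int)) (j : Nat) : List (List Int) :=
  let v := bg braid i j
  let nb1 := if v = 1 then setCell (setCell nb i j 1) (i+1) j (-1) else nb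
  if v = -1 then setCell (setCell nb1 i j (-1)) (i+1) j 1 else nb1

-- A's inner loop: for j in range(m)
def rowA (braid : List (List Int)) (m : Nat) (nb : List (List Int)) (i : Nat) : List (List Int) :=
  (List.range m).foldl (stepA braid i) nb

def e1_to_e2 (braid : List (List Int)) : List (List Int) :=
  (List.range braid.length).foldl (rowA braid (braid.headD []).length)
    (List.replicate (braid.length+1) (List.replicate (braid.headD []).length (0:Int)))

-- ===== PORT B =====
-- Source B's cell(i, j)
def cellB (braid : List (List Int)) (n i j : Nat) : Int :=
  if i < n ∧ (bg braid i j = 1 ∨ bg braid i j = -1) then bg braid i j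
  else if 0 < i ∧ (bg braid (i-1) j = 1 ∨ bg braid (i-1) j = -1) then -(bg braid (i-1) j)
  else 0

def e1_to_e2_alt (braid : List (List Int)) : List (List Int) :=
  (List.range (braid.length+1)).map (fun i =>
    (List.range (braid.headD []).length).map (fun j => cellB braid braid.length i j))

-- ===== PRECONDITION & SPEC =====
-- Pre_ excludes exactly the inputs where Python A raises IndexError: an empty braid
-- (braid[0] fails) or a row shorter than row 0 (braid[i][j] fails).
def Pre_e1_to_e2 (braid : List (List Int)) : Prop :=
  braid ≠ [] ∧ ∀ row ∈ braid, (braid.headD []).length ≤ row.length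
instance (braid : List (List Int)) : Decidable (Pre_e1_to_e2 braid) := by unfold Pre_e1_to_e2; infer_instance

def pvWitness_e1_to_e2 : List (List Int) := [[1, 0], [-1, 1]]

def Spec_e1_to_e2 (braid : List (List Int)) (out : List (List Int)) : Prop := out = e1_to_e2_alt braid
instance (braid : List (List Int)) (out : List (List Int)) : Decidable (Spec_e1_to_e2 braid out) := by unfold Spec_e1_to_e2; infer_instance

-- ===== CLAIM (what is proved, stated in full; the proofs are below) =====
def Claim_equal_e1_to_e2 : Prop := ∀ (braid : List (List Int)), Dom_e1_to_e2 braid → Pre_e1_to_e2 braid → Spec_e1_to_e2 braid (e1_to_e2 braid)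

-- ===== LEMMAS AND PROOFS =====

-- state of A's matrix after processing rows < k fully and columns < l of row k
def F (braid : List (List Int)) (k l x y : Nat) : Int :=
  if (x < k ∨ (x = k ∧ y < l)) ∧ (bg braid x y = 1 ∨ bg braid x y = -1) then bg braid x y
  else if 0 < x ∧ (x - 1 < k ∨ (x - 1 = k ∧ y < l)) ∧ (bg braid (x-1) y = 1 ∨ bg braid (x-1) y = -1) then -(bg braid (x-1) y)
  else 0

def Mat (n m : Nat) (g : Nat → Nat → Int) : List (List Int) :=
  (List.range (n+1)).map (fun x => (List.range m).map (fun y => g x y))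

lemma Mat_congr (n m : Nat) (g h : Nat → Nat → Int)
    (H : ∀ x, x < n + 1 → ∀ y, y < m → g x y = h x y) : Mat n m g = Mat n m h := by
  unfold Mat
  refine List.map_congr_left (fun x hx => ?_)
  refine List.map_congr_left (fun y hy => ?_)
  exact H x (List.mem_range.mp hx) y (List.mem_range.mp hy)

lemma getD_map_range {α : Type} (t : Nat) (f : Nat → α) (i : Nat) (d : α) (hi : i < t) :
    ((List.range t).map f).getD i d = f i := by
  rw [List.getD_eq_getElem?_getD]
  simp [hi]

lemma set_map_range {α : Type} (t : Nat) (f : Nat → α) (i : Nat) (v : α) :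
    ((List.range t).map f).set i v = (List.range t).map (fun x => if x = i then v else f x) := by
  apply List.ext_getElem
  · simp
  · intro x hx hx'
    simp only [List.getElem_set, List.getElem_map, List.getElem_range]
    by_cases h : x = i
    · simp [h]
    · simp only [if_neg h]
      rw [if_neg (fun h' => h h'.symm)]

lemma setCell_Mat (n m : Nat) (g : Nat → Nat → Int) (i j : Nat) (v : Int) (hi : i < n + 1) :
    setCell (Mat n m g) i j v = Mat n m (fun x y => if x = i ∧ y = j then v else g x y) := by
  unfold setCell Mat
  have hrow := getD_map_range (n+1) (fun x => (List.range m).map (fun y => g x y)) i [] hi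
  rw [hrow, set_map_range m (fun y => g i y) j v, set_map_range (n+1) _ i]
  refine List.map_congr_left (fun x _ => ?_)
  by_cases hx : x = i
  · subst hx
    rw [if_pos rfl]
    refine List.map_congr_left (fun y _ => ?_)
    by_cases hy : y = j <;> simp [hy]
  · simp only [if_neg hx]
    refine List.map_congr_left (fun y _ => ?_)
    simp [hx]

lemma F_point_pos (braid : List (List Int)) (i j x y : Nat) (h1 : bg braid i j = 1) :
    (if x = i+1 ∧ y = j then (-1:Int) else if x = i ∧ y = j then 1 else F braid i j x y)
      = F braid i (j+1) x y := by
  by_cases hy : y = j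
  · by_cases hx : x = i
    · have h1' : bg braid x y = 1 := by rw [hx, hy]; exact h1
      simp only [F]; split_ifs <;> omega
    · by_cases hx1 : x = i + 1
      · have hx1' : x - 1 = i := by omega
        have h1' : bg braid (x-1) y = 1 := by rw [hx1', hy]; exact h1
        simp only [F]; split_ifs <;> omega
      · simp only [F]; split_ifs <;> omega
  · simp only [F]; split_ifs <;> omega

lemma F_point_neg (braid : List (List Int)) (i j x y : Nat) (h2 : bg braid i j = -1) :
    (if x = i+1 ∧ y = j then (1:Int) else if x = i ∧ y = j then -1 else F braid i j x y)
      = F braid i (j+1) x y := by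
  by_cases hy : y = j
  · by_cases hx : x = i
    · have h2' : bg braid x y = -1 := by rw [hx, hy]; exact h2
      simp only [F]; split_ifs <;> omega
    · by_cases hx1 : x = i + 1
      · have hx1' : x - 1 = i := by omega
        have h2' : bg braid (x-1) y = -1 := by rw [hx1', hy]; exact h2
        simp only [F]; split_ifs <;> omega
      · simp only [F]; split_ifs <;> omega
  · simp only [F]; split_ifs <;> omega

lemma F_point_zero (braid : List (List Int)) (i j x y : Nat)
    (h1 : ¬ bg braid i j = 1) (h2 : ¬ bg braid i j = -1) :
    F braid i j x y = F braid i (j+1) x y := by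
  by_cases hy : y = j
  · by_cases hx : x = i
    · have h1' : ¬ bg braid x y = 1 := by rw [hx, hy]; exact h1
      have h2' : ¬ bg braid x y = -1 := by rw [hx, hy]; exact h2
      simp only [F]; split_ifs <;> omega
    · by_cases hx1 : x = i + 1
      · have hx1' : x - 1 = i := by omega
        have h1' : ¬ bg braid (x-1) y = 1 := by rw [hx1', hy]; exact h1
        have h2' : ¬ bg braid (x-1) y = -1 := by rw [hx1', hy]; exact h2
        simp only [F]; split_ifs <;> omega
      · simp only [F]; split_ifs <;> omega
  · simp only [F]; split_ifs <;> omega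

lemma stepA_Mat (braid : List (List Int)) (n m i j : Nat) (hi : i < n) :
    stepA braid i (Mat n m (F braid i j)) j = Mat n m (F braid i (j+1)) := by
  by_cases h1 : bg braid i j = 1
  · have h2 : ¬ (bg braid i j = -1) := by omega
    simp only [stepA, if_pos h1, if_neg h2]
    rw [setCell_Mat n m _ i j 1 (by omega), setCell_Mat n m _ (i+1) j (-1) (by omega)]
    exact Mat_congr n m _ _ (fun x _ y _ => F_point_pos braid i j x y h1)
  · by_cases h2 : bg braid i j = -1
    · simp only [stepA, if_neg h1, if_pos h2]
      rw [setCell_Mat n m _ i j (-1) (by omega), setCell_Mat n m _ (i+1) j 1 (by omega)]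
      exact Mat_congr n m _ _ (fun x _ y _ => F_point_neg braid i j x y h2)
    · simp only [stepA, if_neg h1, if_neg h2]
      exact Mat_congr n m _ _ (fun x _ y _ => F_point_zero braid i j x y h1 h2)

lemma rowA_inv (braid : List (List Int)) (n m i : Nat) (hi : i < n) :
    ∀ l, l ≤ m → (List.range l).foldl (stepA braid i) (Mat n m (F braid i 0)) = Mat n m (F braid i l) := by
  intro l
  induction l with
  | zero => intro _; simp
  | succ l ih =>
      intro hl
      rw [List.range_succ, List.foldl_append, ih (by omega)]
      simpa using stepA_Mat braid n m i l hi

lemma row_boundary (braid : List (List Int)) (n m i : Nat) :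
    Mat n m (F braid i m) = Mat n m (F braid (i+1) 0) := by
  refine Mat_congr n m _ _ (fun x hx y hy => ?_)
  unfold F
  split_ifs <;> omega

lemma outer_inv (braid : List (List Int)) (n m : Nat) :
    ∀ k, k ≤ n → (List.range k).foldl (rowA braid m) (Mat n m (F braid 0 0)) = Mat n m (F braid k 0) := by
  intro k
  induction k with
  | zero => intro _; simp
  | succ k ih =>
      intro hk
      rw [List.range_succ, List.foldl_append, ih (by omega)]
      simp only [List.foldl_cons, List.foldl_nil]
      unfold rowA
      rw [rowA_inv braid n m k (by omega) m (le_refl m), row_boundary]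

lemma init_Mat (braid : List (List Int)) (n m : Nat) :
    List.replicate (n+1) (List.replicate m (0:Int)) = Mat n m (F braid 0 0) := by
  unfold Mat
  apply List.ext_getElem
  · simp
  · intro x hx hx'
    simp only [List.getElem_replicate, List.getElem_map, List.getElem_range]
    apply List.ext_getElem
    · simp
    · intro y hy hy'
      simp only [List.getElem_replicate, List.getElem_map, List.getElem_range]
      unfold F
      split_ifs <;> omega

lemma final_Mat (braid : List (List Int)) (n m : Nat) (hn : n = braid.length) :
    Mat n m (F braid n 0) = Mat n m (fun x y => cellB braid n x y) := by
  refine Mat_congr n m _ _ (fun x hx y hy => ?_)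
  unfold F cellB
  split_ifs <;> omega

-- ===== VERDICT (by name: the statement is the Claim_ definition above) =====
theorem e1_to_e2_spec : Claim_equal_e1_to_e2 := by
  intro braid _ _
  unfold Spec_e1_to_e2 e1_to_e2 e1_to_e2_alt
  rw [init_Mat braid braid.length (braid.headD []).length,
      outer_inv braid braid.length (braid.headD []).length braid.length (le_refl _),
      final_Mat braid braid.length (braid.headD []).length rfl]
  rfl
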